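-- pv_equiv track=rewrite | github.com/rot226/LoRaFlexSim-1.0.1 | article_c/common/csv_io.py | _step2_dedupe_keys
-- ===== SOURCE A (Python) =====
-- def _step2_dedupe_keys(rows: list[dict[str, object]]) -> tuple[str, ...]:
--     """Construit les clés de déduplication Step2 selon les colonnes présentes."""
--     dedupe_keys: list[str] = ["network_size", "algo", "snir_mode"]
--     if any("round" in row for row in rows):
--         dedupe_keys.append("round")
--     elif any("replication" in row for row in rows):
--         dedupe_keys.append("replication")
--     if any("cluster" in row for row in rows):
--         dedupe_keys.append("cluster")
--     return tuple(dedupe_keys)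
-- ===== SOURCE B (Python) =====
-- def _step2_dedupe_keys(rows: list[dict[str, object]]) -> tuple[str, ...]:
--     """Construit les clés de déduplication Step2 selon les colonnes présentes."""
--     present: frozenset[str] = frozenset().union(*map(dict.keys, rows)) if rows else frozenset()
--     # data-driven priority groups: for each group keep the first key that is present
--     groups = [["round", "replication"], ["cluster"]]
--     extras = (next((k for k in g if k in present), None) for g in groups)
--     return ("network_size", "algo", "snir_mode") + tuple(k for k in extras if k is not None)
-- ===== Notes on version B (the rewrite author's own statement) =====
-- stated objective: alternative
-- what changed: Replaces the if/elif append branching and three any()-scans by a data-driven scheme: one pass collects the set of present column names, then a table of priority groups ([round, replication], [cluster]) is mapped to 'first present key in each group' and the non-misses are concatenated onto the base tuple.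
import Mathlib
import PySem

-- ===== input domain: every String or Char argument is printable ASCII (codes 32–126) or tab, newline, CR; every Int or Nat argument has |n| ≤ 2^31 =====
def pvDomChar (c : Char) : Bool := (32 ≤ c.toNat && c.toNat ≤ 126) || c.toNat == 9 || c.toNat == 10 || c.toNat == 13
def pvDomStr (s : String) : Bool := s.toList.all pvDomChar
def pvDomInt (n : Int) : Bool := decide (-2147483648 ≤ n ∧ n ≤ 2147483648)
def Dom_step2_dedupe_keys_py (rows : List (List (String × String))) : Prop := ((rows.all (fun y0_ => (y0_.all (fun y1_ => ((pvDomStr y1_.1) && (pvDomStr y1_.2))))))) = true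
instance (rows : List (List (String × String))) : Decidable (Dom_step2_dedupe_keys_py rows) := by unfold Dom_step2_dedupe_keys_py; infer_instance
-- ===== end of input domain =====

-- B replaces A's if/elif append branching and three any()-scans by a single pass building the
-- set of present column names plus a data-driven table of priority groups (alternative decomposition).

-- ===== PORT A =====
-- Port of A: three any()-scans over rows, if/elif append order preserved.
def step2_dedupe_keys_py (rows : List (List (String × String))) : List String :=
  let base := ["network_size", "algo", "snir_mode"]
  let d1 :=
    if rows.any (fun row => row.any (fun kv => kv.1 == "round")) then base ++ ["round"]
    else if rows.any (fun row => row.any (fun kv => kv.1 == "replication")) then base ++ ["replication"]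
    else base
  if rows.any (fun row => row.any (fun kv => kv.1 == "cluster")) then d1 ++ ["cluster"] else d1

-- ===== PORT B =====
-- Port of B: one pass collects the present column names; a table of priority groups is mapped
-- to 'first present key of the group' and the hits are concatenated onto the base keys.
def step2_dedupe_keys_py_alt (rows : List (List (String × String))) : List String :=
  let present := rows.foldl (fun s row => PySem.Set.update s (row.map Prod.fst)) PySem.Set.empty
  let groups : List (List String) := [["round", "replication"], ["cluster"]]
  let extras := groups.map (fun g => g.find? (fun k => PySem.Set.contains present k))
  ["network_size", "algo", "snir_mode"] ++ extras.filterMap id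

-- ===== PRECONDITION & SPEC =====
def Spec_step2_dedupe_keys_py (rows : List (List (String × String))) (out : List String) : Prop := out = step2_dedupe_keys_py_alt rows
instance (rows : List (List (String × String))) (out : List String) : Decidable (Spec_step2_dedupe_keys_py rows out) := by unfold Spec_step2_dedupe_keys_py; infer_instance

-- ===== CLAIM (what is proved, stated in full; the proofs are below) =====
def Claim_equal_step2_dedupe_keys_py : Prop := ∀ (rows : List (List (String × String))), Dom_step2_dedupe_keys_py rows → Spec_step2_dedupe_keys_py rows (step2_dedupe_keys_py rows)

-- ===== LEMMAS AND PROOFS =====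

-- membership in the accumulated set of keys = some row contains the key
lemma present_contains (rows : List (List (String × String))) (s : PySem.Set String) (k : String) :
    PySem.Set.contains (rows.foldl (fun s row => PySem.Set.update s (row.map Prod.fst)) s) k
      = (s.contains k || rows.any (fun row => row.any (fun kv => kv.1 == k))) := by
  induction rows generalizing s with
  | nil => simp
  | cons row rest ih =>
    simp only [List.foldl_cons, List.any_cons, ih]
    rw [Bool.eq_iff_iff]
    simp [PySem.Set.mem_update, List.mem_map, List.any_eq_true, beq_iff_eq,
      PySem.Set.contains, or_assoc]

-- ===== VERDICT (by name: the statement is the Claim_ definition above) =====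
theorem step2_dedupe_keys_py_spec : Claim_equal_step2_dedupe_keys_py := by
  intro rows _
  unfold Spec_step2_dedupe_keys_py step2_dedupe_keys_py step2_dedupe_keys_py_alt
  simp only [List.map_cons, List.map_nil, List.find?, present_contains]
  simp only [PySem.Set.empty, PySem.Set.contains]
  by_cases h1 : rows.any (fun row => row.any (fun kv => kv.1 == "round")) = true <;>
  by_cases h2 : rows.any (fun row => row.any (fun kv => kv.1 == "replication")) = true <;>
  by_cases h3 : rows.any (fun row => row.any (fun kv => kv.1 == "cluster")) = true <;>
  simp [h1, h2, h3]
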